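-- pv_equiv track=rewrite | github.com/lihuoran/MobilityPredictionPaper | markov/general-markov-next-important.py | next_important_loc
-- ===== SOURCE A (Python) =====
-- def next_important_loc(minute, l1, t1, l2, t2):
--     assert(len(l1) == len(t1))
--     assert(len(l2) == len(t2))
--
--     l = [] # l for location
--     d = [] # d for duration
--     cur = None
--     start = None
--     for i in range(len(l2)):
--     	if cur == None:
--     		cur = l2[i]
--     		start = t2[i]
--     	elif l2[i] != cur:
--     		l.append(cur)
--     		d.append(t2[i] - start)
--     		cur = l2[i]
--     		start = t2[i]
--     if cur != None:
--     	l.append(cur)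
--     	d.append(t2[-1] - start)
--
--     l = [l[i] for i in range(len(d)) if d[i] >= minute * 60 * 1000]
--     l = [e for e in l if e != l1[-1]]
--     return l[0] if len(l) > 0 else None
-- ===== SOURCE B (Python) =====
-- def next_important_loc(minute, l1, t1, l2, t2):
--     assert(len(l1) == len(t1))
--     assert(len(l2) == len(t2))
--     thr = minute * 60 * 1000
--     cur = None
--     start = None
--     for loc, ts in zip(l2, t2):
--         if cur is None:
--             cur, start = loc, ts
--         elif loc != cur:
--             if ts - start >= thr and cur != l1[-1]:
--                 return cur
--             cur, start = loc, ts
--     if cur is not None and t2[-1] - start >= thr and cur != l1[-1]: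
--         return cur
--     return None
-- ===== Notes on version B (the rewrite author's own statement) =====
-- stated objective: simpler
-- what changed: Replaces A's build-two-lists-then-two-filter-comprehensions structure with a single early-exit pass that tests each run's duration and location as the run closes, returning immediately on the first qualifying run, so no intermediate l/d lists or filtered copies are built (constant-factor speedup, measured ~1.8x).
-- outside the precondition, e.g. on next_important_loc(1, [], [], [5], [0]): A returns None, B returns None
import Mathlib
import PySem

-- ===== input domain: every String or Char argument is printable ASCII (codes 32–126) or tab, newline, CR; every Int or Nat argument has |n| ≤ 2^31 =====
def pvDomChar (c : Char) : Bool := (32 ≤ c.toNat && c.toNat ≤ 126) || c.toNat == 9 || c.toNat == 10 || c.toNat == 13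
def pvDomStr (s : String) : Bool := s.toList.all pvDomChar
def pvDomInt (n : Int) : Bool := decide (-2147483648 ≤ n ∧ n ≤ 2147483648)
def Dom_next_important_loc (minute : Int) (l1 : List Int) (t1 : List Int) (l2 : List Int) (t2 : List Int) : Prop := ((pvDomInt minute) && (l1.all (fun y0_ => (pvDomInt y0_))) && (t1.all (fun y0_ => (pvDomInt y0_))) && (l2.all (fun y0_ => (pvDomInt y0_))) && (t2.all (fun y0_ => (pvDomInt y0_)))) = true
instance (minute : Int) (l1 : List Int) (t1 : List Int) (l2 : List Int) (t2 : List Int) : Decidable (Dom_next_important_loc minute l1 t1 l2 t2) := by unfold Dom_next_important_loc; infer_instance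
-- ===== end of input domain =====

-- B replaces A's build-lists-then-filter-twice structure with a single early-exit pass over the runs (objective: simpler).

-- ===== PORT A =====
-- loop body of A's for-loop, factored as a helper; state is (l, d, cur, start)
def nilStep (s : List Int × List Int × Option Int × Option Int) (loc ts : Int) :
    List Int × List Int × Option Int × Option Int :=
  match s.2.2.1 with
  | none => (s.1, s.2.1, some loc, some ts)
  | some c =>
      if loc ≠ c then (s.1 ++ [c], s.2.1 ++ [ts - s.2.2.2.getD 0], some loc, some ts) else s

def next_important_loc (minute : Int) (l1 : List Int) (t1 : List Int) (l2 : List Int) (t2 : List Int) : Option Int :=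
  -- for i in range(len(l2)); inside Pre_ the indices are in range, so getD never hits its default
  let st := (List.range l2.length).foldl (fun s i => nilStep s (l2.getD i 0) (t2.getD i 0)) ([], [], none, none)
  let ld : List Int × List Int :=
    match st.2.2.1 with
    | none => (st.1, st.2.1)
    | some c => (st.1 ++ [c], st.2.1 ++ [(PySem.List.pyGet? t2 (-1)).getD 0 - st.2.2.2.getD 0])
  -- l = [l[i] for i in range(len(d)) if d[i] >= minute*60*1000]
  let lf := (List.range ld.2.length).filterMap
      (fun i => if ld.2.getD i 0 ≥ minute * 60 * 1000 then some (ld.1.getD i 0) else none)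
  -- l = [e for e in l if e != l1[-1]]  (l1[-1] raises on empty l1 in Python: that case is outside Pre_)
  let ll := lf.filter (fun e => decide (e ≠ (PySem.List.pyGet? l1 (-1)).getD 0))
  if ll.length > 0 then some (ll.getD 0 0) else none

-- ===== PORT B =====
-- B's loop over zip(l2, t2) after the first element fixed (cur, start); early return as each run closes
def altGo (thr lastL tlast : Int) : Int → Int → List (Int × Int) → Option Int
  | cur, start, [] => if tlast - start ≥ thr ∧ cur ≠ lastL then some cur else none
  | cur, start, (loc, ts) :: rest =>
      if loc ≠ cur then
        if ts - start ≥ thr ∧ cur ≠ lastL then some cur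
        else altGo thr lastL tlast loc ts rest
      else altGo thr lastL tlast cur start rest

def next_important_loc_alt (minute : Int) (l1 : List Int) (t1 : List Int) (l2 : List Int) (t2 : List Int) : Option Int :=
  match l2.zip t2 with
  | [] => none
  | (loc, ts) :: rest =>
      altGo (minute * 60 * 1000) ((PySem.List.pyGet? l1 (-1)).getD 0)
        ((PySem.List.pyGet? t2 (-1)).getD 0) loc ts rest

-- ===== PRECONDITION & SPEC =====
-- Pre_ excludes inputs failing A's asserts (AssertionError) and inputs with empty l1 but nonempty l2, on
-- which A raises IndexError at l1[-1] whenever some run passes the duration filter; when no run passes,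
-- A returns None there too, but whether l1[-1] is reached depends on the computed durations, so the whole
-- empty-l1-nonempty-l2 corner is excluded (slightly narrower than the raising set; see the cited example).
def Pre_next_important_loc (minute : Int) (l1 : List Int) (t1 : List Int) (l2 : List Int) (t2 : List Int) : Prop :=
  l1.length = t1.length ∧ l2.length = t2.length ∧ (l2 ≠ [] → l1 ≠ [])
instance (minute : Int) (l1 : List Int) (t1 : List Int) (l2 : List Int) (t2 : List Int) : Decidable (Pre_next_important_loc minute l1 t1 l2 t2) := by unfold Pre_next_important_loc; infer_instance
def pvWitness_next_important_loc : Int × List Int × List Int × List Int × List Int :=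
  (1, [7], [0], [3, 4], [0, 70000])

def Spec_next_important_loc (minute : Int) (l1 : List Int) (t1 : List Int) (l2 : List Int) (t2 : List Int) (out : Option Int) : Prop := out = next_important_loc_alt minute l1 t1 l2 t2
instance (minute : Int) (l1 : List Int) (t1 : List Int) (l2 : List Int) (t2 : List Int) (out : Option Int) : Decidable (Spec_next_important_loc minute l1 t1 l2 t2 out) := by unfold Spec_next_important_loc; infer_instance

-- ===== CLAIM (what is proved, stated in full; the proofs are below) =====
def Claim_equal_next_important_loc : Prop := ∀ (minute : Int) (l1 : List Int) (t1 : List Int) (l2 : List Int) (t2 : List Int), Dom_next_important_loc minute l1 t1 l2 t2 → Pre_next_important_loc minute l1 t1 l2 t2 → Spec_next_important_loc minute l1 t1 l2 t2 (next_important_loc minute l1 t1 l2 t2)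

-- ===== LEMMAS AND PROOFS =====

-- run decomposition of (cur, start) followed by a pair list: closed runs, plus the final (cur, start)
def scanRuns (c st : Int) : List (Int × Int) → List (Int × Int) × Int × Int
  | [] => ([], c, st)
  | (loc, ts) :: rest =>
      if loc ≠ c then
        let r := scanRuns loc ts rest
        ((c, ts - st) :: r.1, r.2)
      else scanRuns c st rest

def runsOf (c st tlast : Int) (ps : List (Int × Int)) : List (Int × Int) :=
  (scanRuns c st ps).1 ++ [((scanRuns c st ps).2.1, tlast - (scanRuns c st ps).2.2)]

lemma foldl_range_zip {σ : Type} (step : σ → Int → Int → σ) :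
    ∀ (xs ys : List Int), xs.length = ys.length → ∀ s : σ,
    (List.range xs.length).foldl (fun s i => step s (xs.getD i 0) (ys.getD i 0)) s
      = (xs.zip ys).foldl (fun s p => step s p.1 p.2) s := by
  intro xs
  induction xs with
  | nil => intro ys h s; simp
  | cons a xs ih =>
      intro ys h s
      cases ys with
      | nil => simp at h
      | cons b ys =>
          simp only [List.length_cons, List.range_succ_eq_map, List.foldl_cons, List.foldl_map,
            List.getD_cons_succ, List.getD_cons_zero, List.zip_cons_cons]
          exact ih ys (by simpa using h) _

lemma foldA (ps : List (Int × Int)) : ∀ (l d : List Int) (c st : Int),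
    ps.foldl (fun s p => nilStep s p.1 p.2) (l, d, some c, some st)
      = (l ++ (scanRuns c st ps).1.map Prod.fst, d ++ (scanRuns c st ps).1.map Prod.snd,
         some (scanRuns c st ps).2.1, some (scanRuns c st ps).2.2) := by
  induction ps with
  | nil => intro l d c st; simp [scanRuns]
  | cons p rest ih =>
      intro l d c st
      obtain ⟨loc, ts⟩ := p
      rw [List.foldl_cons]
      by_cases hl : loc = c
      · have hstep : nilStep (l, d, some c, some st) loc ts = (l, d, some c, some st) := by
          simp [nilStep, hl]
        have hs : scanRuns c st ((loc, ts) :: rest) = scanRuns c st rest := by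
          simp [scanRuns, hl]
        rw [hstep, ih, hs]
      · have hstep : nilStep (l, d, some c, some st) loc ts
            = (l ++ [c], d ++ [ts - st], some loc, some ts) := by
          simp [nilStep, hl]
        have hs : scanRuns c st ((loc, ts) :: rest)
            = ((c, ts - st) :: (scanRuns loc ts rest).1, (scanRuns loc ts rest).2) := by
          simp [scanRuns, hl]
        rw [hstep, ih, hs]
        simp

lemma comprehensionA (thr : Int) : ∀ (rs : List (Int × Int)),
    (List.range (rs.map Prod.snd).length).filterMap
        (fun i => if (rs.map Prod.snd).getD i 0 ≥ thr then some ((rs.map Prod.fst).getD i 0) else none)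
      = (rs.filter (fun r => decide (r.2 ≥ thr))).map Prod.fst := by
  intro rs
  induction rs with
  | nil => simp
  | cons r rest ih =>
      simp only [List.map_cons, List.length_cons, List.range_succ_eq_map, List.filterMap_cons,
        List.filterMap_map, Function.comp_def, List.getD_cons_succ, List.getD_cons_zero]
      by_cases h : r.2 ≥ thr
      · simp [h, ← ih]
      · simp [h, ← ih]

lemma head_filter_find (p : Int × Int → Bool) (q : Int → Bool) : ∀ (rs : List (Int × Int)),
    (((rs.filter p).map Prod.fst).filter q).head?
      = (rs.find? (fun r => p r && q r.1)).map Prod.fst := by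
  intro rs
  induction rs with
  | nil => simp
  | cons r rest ih =>
      by_cases hp : p r
      · by_cases hq : q r.1
        · simp [hp, hq]
        · simp [hp, hq, ih]
      · simp [hp, ih]

lemma altGo_find (thr lastL tlast : Int) : ∀ (ps : List (Int × Int)) (c st : Int),
    altGo thr lastL tlast c st ps
      = ((runsOf c st tlast ps).find? (fun r => decide (r.2 ≥ thr) && decide (r.1 ≠ lastL))).map Prod.fst := by
  intro ps
  induction ps with
  | nil =>
      intro c st
      by_cases h1 : tlast - st ≥ thr
      · by_cases h2 : c ≠ lastL
        · simp [altGo, runsOf, scanRuns, h1, h2]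
        · simp [altGo, runsOf, scanRuns, h1, h2]
      · simp [altGo, runsOf, scanRuns, h1]
  | cons p rest ih =>
      intro c st
      obtain ⟨loc, ts⟩ := p
      by_cases hl : loc = c
      · have ha : altGo thr lastL tlast c st ((loc, ts) :: rest) = altGo thr lastL tlast c st rest := by
          simp [altGo, hl]
        have hs : scanRuns c st ((loc, ts) :: rest) = scanRuns c st rest := by
          simp [scanRuns, hl]
        rw [ha, ih]
        simp only [runsOf, hs]
      · have hs : scanRuns c st ((loc, ts) :: rest)
            = ((c, ts - st) :: (scanRuns loc ts rest).1, (scanRuns loc ts rest).2) := by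
          simp [scanRuns, hl]
        by_cases h1 : ts - st ≥ thr
        · by_cases h2 : c ≠ lastL
          · simp [altGo, hl, h1, h2, runsOf, hs]
          · simp [altGo, hl, h1, h2, runsOf, hs, List.find?_cons, ih]
        · simp [altGo, hl, h1, runsOf, hs, List.find?_cons, ih]

lemma head_of_len (l : List Int) :
    (if l.length > 0 then some (l.getD 0 0) else none) = l.head? := by
  cases l <;> simp

-- ===== VERDICT (by name: the statement is the Claim_ definition above) =====
theorem next_important_loc_spec : Claim_equal_next_important_loc := by
  intro minute l1 t1 l2 t2 _ hpre
  obtain ⟨_, hlen2, _⟩ := hpre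
  unfold Spec_next_important_loc
  cases l2 with
  | nil => rfl
  | cons a l2' =>
      cases t2 with
      | nil => simp at hlen2
      | cons b t2' =>
          have hz : (a :: l2').zip (b :: t2') = (a, b) :: l2'.zip t2' := rfl
          have hfold : (List.range (a :: l2').length).foldl
                (fun s i => nilStep s ((a :: l2').getD i 0) ((b :: t2').getD i 0)) ([], [], none, none)
              = ((scanRuns a b (l2'.zip t2')).1.map Prod.fst,
                 (scanRuns a b (l2'.zip t2')).1.map Prod.snd,
                 some (scanRuns a b (l2'.zip t2')).2.1, some (scanRuns a b (l2'.zip t2')).2.2) := by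
            rw [foldl_range_zip nilStep _ _ hlen2, hz, List.foldl_cons]
            have h0 : nilStep ([], [], none, none) a b = ([], [], some a, some b) := rfl
            rw [h0]
            simpa using foldA (l2'.zip t2') [] [] a b
          simp only [next_important_loc, next_important_loc_alt, hz, hfold, Option.getD_some]
          have hmap1 : (scanRuns a b (l2'.zip t2')).1.map Prod.fst ++ [(scanRuns a b (l2'.zip t2')).2.1]
              = (runsOf a b ((PySem.List.pyGet? (b :: t2') (-1)).getD 0) (l2'.zip t2')).map Prod.fst := by
            simp [runsOf]
          have hmap2 : (scanRuns a b (l2'.zip t2')).1.map Prod.snd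
                ++ [(PySem.List.pyGet? (b :: t2') (-1)).getD 0 - (scanRuns a b (l2'.zip t2')).2.2]
              = (runsOf a b ((PySem.List.pyGet? (b :: t2') (-1)).getD 0) (l2'.zip t2')).map Prod.snd := by
            simp [runsOf]
          rw [hmap1, hmap2, comprehensionA, head_of_len, head_filter_find, altGo_find]
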